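-- pv_equiv track=rewrite | github.com/Cesar073/Essen-V2 | sources/mod/form.py | Ajusta_A_2_Dec
-- ===== SOURCE A (Python) =====
-- def Ajusta_A_2_Dec(Valor):
--     Aux1 = str(Valor)
--     Bucle = 0
--     Cont_Dec = 0
--     largo = len(Aux1)
--     Aux2 = ''
--     Coma = False
--     while largo > Bucle:
--         Texto = Aux1[Bucle]
--         if Coma == True:
--             Cont_Dec += 1
--             if Cont_Dec == 2:
--                 Aux2 += Texto
--                 return Aux2
--             else:
--                 Aux2 += Texto
--         else:
--             if Texto == ',' or Texto == '.':
--                 Aux2 += '.'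
--                 Coma = True
--             else:
--                 Aux2 += Texto
--         Bucle += 1
--     return Aux2
-- ===== SOURCE B (Python) =====
-- def Ajusta_A_2_Dec(Valor):
--     s = str(Valor)
--     for i, ch in enumerate(s):
--         if ch in ',.':
--             return s[:i] + '.' + s[i+1:i+3]
--     return s
-- ===== Notes on version B (the rewrite author's own statement) =====
-- stated objective: simpler
-- what changed: Replaces the stateful char-by-char loop (separator flag, decimal counter, repeated string concatenation) by locating the first separator index and returning s[:i] + '.' + s[i+1:i+3] via slicing.
import Mathlib
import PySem

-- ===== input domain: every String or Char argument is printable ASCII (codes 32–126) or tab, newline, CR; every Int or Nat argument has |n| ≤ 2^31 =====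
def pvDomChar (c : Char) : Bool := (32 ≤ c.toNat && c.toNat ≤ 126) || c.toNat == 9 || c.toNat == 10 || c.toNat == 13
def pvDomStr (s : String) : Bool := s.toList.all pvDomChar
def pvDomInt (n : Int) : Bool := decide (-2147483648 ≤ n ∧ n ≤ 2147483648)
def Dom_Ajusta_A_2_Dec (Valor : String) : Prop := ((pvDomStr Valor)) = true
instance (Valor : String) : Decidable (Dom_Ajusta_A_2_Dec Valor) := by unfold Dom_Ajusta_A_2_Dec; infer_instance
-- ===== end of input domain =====

-- B replaces A's stateful char-by-char loop (separator flag + decimal counter) by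
-- finding the first ',' or '.' and slicing: s[:i] + '.' + s[i+1:i+3]  (objective: simpler).

-- ===== PORT A =====
-- A's while loop over the characters, with state Coma (separator seen), Cont_Dec
-- (decimals copied so far) and accumulator Aux2; early `return` inside the loop
-- becomes the non-recursive branch.
def pvLoopA : List Char → Bool → Nat → List Char → List Char
  | [], _, _, aux2 => aux2
  | texto :: rest, coma, contDec, aux2 =>
    if coma = true then
      if contDec + 1 = 2 then aux2 ++ [texto]          -- return Aux2 after appending
      else pvLoopA rest coma (contDec + 1) (aux2 ++ [texto])
    else
      if texto = ',' ∨ texto = '.' then pvLoopA rest true contDec (aux2 ++ ['.'])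
      else pvLoopA rest coma contDec (aux2 ++ [texto])

def Ajusta_A_2_Dec (Valor : String) : String :=
  String.mk (pvLoopA Valor.toList false 0 [])

-- ===== PORT B =====
def Ajusta_A_2_Dec_alt (Valor : String) : String :=
  let s := Valor.toList
  match s.findIdx? (fun ch => ch == ',' || ch == '.') with
  | none => String.mk s
  | some i => String.mk (s.take i ++ '.' :: (s.drop (i + 1)).take 2)

-- ===== PRECONDITION & SPEC =====
def Spec_Ajusta_A_2_Dec (Valor : String) (out : String) : Prop := out = Ajusta_A_2_Dec_alt Valor
instance (Valor : String) (out : String) : Decidable (Spec_Ajusta_A_2_Dec Valor out) := by unfold Spec_Ajusta_A_2_Dec; infer_instance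

-- ===== CLAIM (what is proved, stated in full; the proofs are below) =====
def Claim_equal_Ajusta_A_2_Dec : Prop := ∀ (Valor : String), Dom_Ajusta_A_2_Dec Valor → Spec_Ajusta_A_2_Dec Valor (Ajusta_A_2_Dec Valor)

-- ===== LEMMAS AND PROOFS =====

-- B's whole result as a list of characters.
def pvB (l : List Char) : List Char :=
  match l.findIdx? (fun ch => ch == ',' || ch == '.') with
  | none => l
  | some i => l.take i ++ '.' :: (l.drop (i + 1)).take 2

-- after the separator with one decimal already copied, A copies at most one more char
lemma pvLoopA_true_one (l : List Char) (acc : List Char) :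
    pvLoopA l true 1 acc = acc ++ l.take 1 := by
  cases l with
  | nil => simp [pvLoopA]
  | cons c rest => simp [pvLoopA]

-- right after the separator, A copies at most two more chars
lemma pvLoopA_true_zero (l : List Char) (acc : List Char) :
    pvLoopA l true 0 acc = acc ++ l.take 2 := by
  cases l with
  | nil => simp [pvLoopA]
  | cons c rest =>
    simp only [pvLoopA]
    norm_num [pvLoopA_true_one, List.take_succ_cons]

-- before the separator, A's loop produces exactly B's value
lemma pvLoopA_false (l : List Char) (acc : List Char) :
    pvLoopA l false 0 acc = acc ++ pvB l := by
  induction l generalizing acc with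
  | nil => simp [pvLoopA, pvB]
  | cons c rest ih =>
    by_cases h : c = ',' ∨ c = '.'
    · have hsep : (c == ',' || c == '.') = true := by
        rcases h with h | h <;> simp [h]
      simp [pvLoopA, h, pvLoopA_true_zero, pvB, List.findIdx?_cons, hsep]
    · have hsep : (c == ',' || c == '.') = false := by
        rcases not_or.mp h with ⟨h1, h2⟩
        simp [h1, h2]
      simp only [pvLoopA, Bool.false_eq_true, if_false, if_neg h]
      rw [ih (acc ++ [c])]
      have hB : pvB (c :: rest) = c :: pvB rest := by
        simp only [pvB, List.findIdx?_cons, hsep, Bool.false_eq_true, if_false]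
        cases hfi : rest.findIdx? (fun ch => ch == ',' || ch == '.') with
        | none => simp
        | some i => simp [List.take_succ_cons, List.drop_succ_cons]
      rw [hB]
      simp

lemma alt_eq_pvB (Valor : String) : Ajusta_A_2_Dec_alt Valor = String.mk (pvB Valor.toList) := by
  unfold Ajusta_A_2_Dec_alt pvB
  cases h : Valor.toList.findIdx? (fun ch => ch == ',' || ch == '.') <;> simp [h]

-- ===== VERDICT (by name: the statement is the Claim_ definition above) =====
theorem Ajusta_A_2_Dec_spec : Claim_equal_Ajusta_A_2_Dec := by
  intro Valor _
  unfold Spec_Ajusta_A_2_Dec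
  rw [alt_eq_pvB, Ajusta_A_2_Dec, pvLoopA_false]
  simp
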